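-- pv_equiv track=rewrite | github.com/lazarstosic-ai/ai-pdf-analyzer | main.py | find_duplicate_dois
-- ===== SOURCE A (Python) =====
-- from typing import Any, Dict, List, Optional
--
-- def find_duplicate_dois(dois: List[str]) -> List[str]:
--     seen = set()
--     duplicates = []
--
--     for doi in dois:
--         doi_lower = doi.lower()
--         if doi_lower in seen:
--             duplicates.append(doi)
--         else:
--             seen.add(doi_lower)
--
--     return duplicates
-- ===== SOURCE B (Python) =====
-- def find_duplicate_dois(dois):
--     # Different decomposition: two passes. First build a map from lowercased DOI
--     # to the index of its first occurrence; then an element is a duplicate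
--     # exactly when its first occurrence is strictly earlier than itself.
--     first = {}
--     for i, d in enumerate(dois):
--         first.setdefault(d.lower(), i)
--     return [d for i, d in enumerate(dois) if first[d.lower()] < i]
-- ===== Notes on version B (the rewrite author's own statement) =====
-- stated objective: alternative
-- what changed: B replaces A's single-pass seen-set-plus-accumulator loop with two passes: it first builds a map from each lowercased DOI to its first-occurrence index, then a comprehension keeps every element whose first occurrence is strictly earlier than its own position.
import Mathlib
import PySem

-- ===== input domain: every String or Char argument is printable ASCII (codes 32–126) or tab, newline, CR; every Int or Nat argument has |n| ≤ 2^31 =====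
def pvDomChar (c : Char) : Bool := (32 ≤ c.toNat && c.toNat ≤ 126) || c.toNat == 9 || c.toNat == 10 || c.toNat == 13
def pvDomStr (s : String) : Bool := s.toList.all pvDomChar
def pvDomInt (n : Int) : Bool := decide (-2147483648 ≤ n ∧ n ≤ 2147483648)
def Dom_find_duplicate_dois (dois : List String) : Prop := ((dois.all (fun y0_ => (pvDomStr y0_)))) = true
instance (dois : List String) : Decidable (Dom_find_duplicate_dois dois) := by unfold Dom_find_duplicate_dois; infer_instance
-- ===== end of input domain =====

-- B replaces A's single-pass seen-set loop by two passes: a first-occurrence index map, then a comprehension keeping each element whose lowercased form first occurred strictly earlier.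


-- ===== PORT A =====
-- the 'for doi in dois' loop, carrying the set 'seen' and the list 'duplicates'
def find_duplicate_dois_loop : List String → PySem.Set String → List String → List String
  | [], _, duplicates => duplicates
  | doi :: rest, seen, duplicates =>
    let doi_lower := PySem.Str.lower doi
    if PySem.Set.contains seen doi_lower then
      find_duplicate_dois_loop rest seen (duplicates ++ [doi])
    else
      find_duplicate_dois_loop rest (PySem.Set.add seen doi_lower) duplicates

def find_duplicate_dois (dois : List String) : List String :=
  find_duplicate_dois_loop dois PySem.Set.empty []

-- ===== PORT B =====
-- first = {}; for i, d in enumerate(dois): first.setdefault(d.lower(), i)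
-- return [d for i, d in enumerate(dois) if first[d.lower()] < i]
-- (first[d.lower()] cannot raise KeyError: every key was inserted in the first pass,
--  so get? is always some here and the getD default is never used)
def find_duplicate_dois_alt (dois : List String) : List String :=
  let first := (PySem.List.enumerate dois 0).foldl
      (fun acc p => PySem.Dict.setdefault acc (PySem.Str.lower p.2) p.1) PySem.Dict.empty
  ((PySem.List.enumerate dois 0).filter (fun p =>
      decide ((PySem.Dict.get? first (PySem.Str.lower p.2)).getD 0 < p.1))).map (·.2)

-- ===== PRECONDITION & SPEC =====
def Spec_find_duplicate_dois (dois : List String) (out : List String) : Prop := out = find_duplicate_dois_alt dois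
instance (dois : List String) (out : List String) : Decidable (Spec_find_duplicate_dois dois out) := by unfold Spec_find_duplicate_dois; infer_instance

-- ===== CLAIM (what is proved, stated in full; the proofs are below) =====
def Claim_equal_find_duplicate_dois : Prop := ∀ (dois : List String), Dom_find_duplicate_dois dois → Spec_find_duplicate_dois dois (find_duplicate_dois dois)

-- ===== LEMMAS AND PROOFS =====

-- common characterisation: duplicates of 'rest' relative to an already-seen prefix 'pre'
def dupsFrom (pre rest : List String) : List String :=
  match rest with
  | [] => []
  | d :: rs =>
    (if pre.any (fun x => PySem.Str.lower d == PySem.Str.lower x) then [d] else [])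
      ++ dupsFrom (pre ++ [d]) rs

theorem set_contains_lower (pre : List String) (y : String) :
    PySem.Set.contains (PySem.Set.ofList (pre.map PySem.Str.lower)) y
      = pre.any (fun x => y == PySem.Str.lower x) := by
  rw [Bool.eq_iff_iff]
  simp only [PySem.Set.contains, List.contains_iff_mem, PySem.Set.mem_ofList,
    List.mem_map, List.any_eq_true, beq_iff_eq]
  constructor
  · rintro ⟨x, hx, hy⟩; exact ⟨x, hx, hy.symm⟩
  · rintro ⟨x, hx, hy⟩; exact ⟨x, hx, hy.symm⟩

theorem ofList_snoc (xs : List String) (y : String) :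
    PySem.Set.ofList (xs ++ [y]) = PySem.Set.add (PySem.Set.ofList xs) y := by
  simp [PySem.Set.ofList_eq_foldl, List.foldl_append]

theorem loop_eq_dupsFrom (rest : List String) : ∀ (pre acc : List String),
    find_duplicate_dois_loop rest (PySem.Set.ofList (pre.map PySem.Str.lower)) acc
      = acc ++ dupsFrom pre rest := by
  induction rest with
  | nil => intro pre acc; simp [find_duplicate_dois_loop, dupsFrom]
  | cons d rs ih =>
    intro pre acc
    simp only [find_duplicate_dois_loop, dupsFrom, set_contains_lower]
    by_cases h : pre.any (fun x => PySem.Str.lower d == PySem.Str.lower x)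
    · rw [if_pos h, if_pos h]
      have hseen : PySem.Set.ofList (pre.map PySem.Str.lower)
          = PySem.Set.ofList ((pre ++ [d]).map PySem.Str.lower) := by
        rw [List.map_append, List.map_singleton, ofList_snoc, PySem.Set.add]
        rw [if_pos]
        simp only [PySem.Set.contains, List.contains_iff_mem, PySem.Set.mem_ofList, List.mem_map]
        obtain ⟨x, hx, hy⟩ := List.any_eq_true.mp h
        exact ⟨x, hx, (beq_iff_eq.mp hy).symm⟩
      rw [hseen, ih (pre ++ [d])]
      simp
    · rw [if_neg h, if_neg h]
      have hadd : PySem.Set.add (PySem.Set.ofList (pre.map PySem.Str.lower)) (PySem.Str.lower d)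
          = PySem.Set.ofList ((pre ++ [d]).map PySem.Str.lower) := by
        rw [List.map_append, List.map_singleton, ofList_snoc]
      rw [hadd, ih (pre ++ [d])]
      simp

-- what the first pass builds: get? is the index of the first lowercase match, shifted by s
theorem get?_build (xs : List String) : ∀ (s : Int) (d : PySem.Dict String Int) (k : String),
    ((PySem.List.enumerate xs s).foldl
        (fun acc p => PySem.Dict.setdefault acc (PySem.Str.lower p.2) p.1) d).get? k
      = (d.get? k).or ((xs.findIdx? (fun x => PySem.Str.lower x == k)).map
          (fun (j : Nat) => s + (j : Int))) := by
  induction xs with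
  | nil => intro s d k; simp [PySem.List.enumerate_nil]
  | cons x xs ih =>
    intro s d k
    rw [PySem.List.enumerate_cons, List.foldl_cons, ih, List.findIdx?_cons]
    by_cases h : k = PySem.Str.lower x
    · subst h
      rw [PySem.Dict.get?_setdefault_self, if_pos (by simp)]
      cases d.get? (PySem.Str.lower x) <;> simp
    · rw [PySem.Dict.get?_setdefault_of_ne _ _ h, if_neg (by simpa using Ne.symm h)]
      cases hfi : xs.findIdx? (fun y => PySem.Str.lower y == k) with
      | none => simp
      | some i =>
        cases d.get? k with
        | none => simp; omega
        | some v => simp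

theorem get?_first (dois : List String) (k : String) :
    ((PySem.List.enumerate dois 0).foldl
        (fun acc p => PySem.Dict.setdefault acc (PySem.Str.lower p.2) p.1) PySem.Dict.empty).get? k
      = (dois.findIdx? (fun x => PySem.Str.lower x == k)).map (fun (j : Nat) => (j : Int)) := by
  rw [get?_build]
  cases hfi : dois.findIdx? (fun x => PySem.Str.lower x == k) <;>
    simp [PySem.Dict.get?, PySem.Dict.empty]

-- the first-occurrence test at position pre.length is exactly "seen in the prefix"
theorem firstIdx_cond (pre : List String) (d : String) (rs : List String) :
    decide ((((pre ++ d :: rs).findIdx? (fun x => PySem.Str.lower x == PySem.Str.lower d)).map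
        (fun (j : Nat) => (j : Int))).getD 0 < (pre.length : Int))
      = pre.any (fun x => PySem.Str.lower d == PySem.Str.lower x) := by
  by_cases h : pre.any (fun x => PySem.Str.lower d == PySem.Str.lower x)
  · obtain ⟨j, hj⟩ : ∃ j, pre.findIdx? (fun x => PySem.Str.lower x == PySem.Str.lower d) = some j := by
      cases hfi : pre.findIdx? (fun x => PySem.Str.lower x == PySem.Str.lower d) with
      | some j => exact ⟨j, rfl⟩
      | none =>
        obtain ⟨x, hx, hy⟩ := List.any_eq_true.mp h
        have := (List.findIdx?_eq_none_iff.mp hfi) x hx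
        simp only [beq_iff_eq] at this hy
        exact absurd hy.symm (by simpa using this)
    have hjlt : j < pre.length := (List.findIdx?_eq_some_iff_findIdx_eq.mp hj).1
    rw [h, List.findIdx?_append, hj, Option.some_or]
    simp only [Option.map_some, Option.getD_some, decide_eq_true_eq]
    exact_mod_cast hjlt
  · have hnone : pre.findIdx? (fun x => PySem.Str.lower x == PySem.Str.lower d) = none := by
      rw [List.findIdx?_eq_none_iff]
      intro x hx
      have := (List.any_eq_false.mp (Bool.of_not_eq_true h)) x hx
      simp only [beq_iff_eq] at this
      simp only [beq_eq_false_iff_ne, ne_eq]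
      intro hc; exact this hc.symm
    rw [Bool.of_not_eq_true h, List.findIdx?_append, hnone, List.findIdx?_cons,
      if_pos (by simp)]
    simp

theorem alt_eq_dupsFrom (rest : List String) : ∀ (pre : List String),
    ((PySem.List.enumerate rest (pre.length : Int)).filter (fun p =>
        decide ((((pre ++ rest).findIdx? (fun x => PySem.Str.lower x == PySem.Str.lower p.2)).map
          (fun (j : Nat) => (j : Int))).getD 0 < p.1))).map (·.2)
      = dupsFrom pre rest := by
  induction rest with
  | nil => intro pre; simp [PySem.List.enumerate_nil, dupsFrom]
  | cons d rs ih =>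
    intro pre
    rw [PySem.List.enumerate_cons, List.filter_cons]
    have happ : pre ++ d :: rs = (pre ++ [d]) ++ rs := by simp
    have hlen : (pre.length : Int) + 1 = ((pre ++ [d]).length : Int) := by simp
    have htail : ((PySem.List.enumerate rs ((pre.length : Int) + 1)).filter (fun p =>
        decide ((((pre ++ d :: rs).findIdx? (fun x => PySem.Str.lower x == PySem.Str.lower p.2)).map
          (fun (j : Nat) => (j : Int))).getD 0 < p.1))).map (·.2)
        = dupsFrom (pre ++ [d]) rs := by
      rw [hlen, happ]
      exact ih (pre ++ [d])
    have hcond := firstIdx_cond pre d rs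
    by_cases h : pre.any (fun x => PySem.Str.lower d == PySem.Str.lower x)
    · rw [if_pos (by rw [← hcond] at h; exact h), List.map_cons, htail, dupsFrom, if_pos h]
      rfl
    · rw [if_neg (by rw [← hcond] at h; exact h), htail, dupsFrom, if_neg h]
      simp

-- ===== VERDICT (by name: the statement is the Claim_ definition above) =====
theorem find_duplicate_dois_spec : Claim_equal_find_duplicate_dois := by
  intro dois _
  show find_duplicate_dois dois = find_duplicate_dois_alt dois
  have hA : find_duplicate_dois_loop dois PySem.Set.empty [] = dupsFrom [] dois :=
    loop_eq_dupsFrom dois [] []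
  have hB : find_duplicate_dois_alt dois = dupsFrom [] dois := by
    show ((PySem.List.enumerate dois 0).filter (fun p =>
        decide ((PySem.Dict.get? ((PySem.List.enumerate dois 0).foldl
            (fun acc p => PySem.Dict.setdefault acc (PySem.Str.lower p.2) p.1) PySem.Dict.empty)
          (PySem.Str.lower p.2)).getD 0 < p.1))).map (·.2) = dupsFrom [] dois
    rw [List.filter_congr (fun p _ => by rw [get?_first])]
    exact alt_eq_dupsFrom dois []
  rw [find_duplicate_dois, hA, hB]
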